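-- pv_equiv track=rewrite | github.com/pichur/UDG | udg_mg.py | get_neighborhood_points
-- ===== SOURCE A (Python) =====
-- HALF_OF_GRAY_AREA_THICKNESS = 10000 # x (half of the optional neighborhood circular crown thickness)
--
-- GRID_SPACEMENT = 7071 # g < x/sqrt(2)
--
-- def square_distance(a, b):
--     return (a[0]-b[0])**2 + (a[1]-b[1])**2
--
-- def get_neighborhood_points(label, point, radius, include_gray_zone):
--     result = set()
--
--     if include_gray_zone:
--         allowed_distance = radius + HALF_OF_GRAY_AREA_THICKNESS
--     else:
--         allowed_distance = radius - HALF_OF_GRAY_AREA_THICKNESS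
--
--     allowed_square_distance = allowed_distance**2
--
--     # bounding square
--     trim = allowed_distance % GRID_SPACEMENT
--     left = point[0] - allowed_distance + trim
--     right = point[0] + allowed_distance - trim
--     bottom = point[1] - allowed_distance + trim
--     top = point[1] + allowed_distance - trim
--
--     # actual grid points within neighboring distance
--     for x in range(left, right+1, GRID_SPACEMENT):
--         for y in range(bottom, top+1, GRID_SPACEMENT):
--
--             # old way
--             if (((include_gray_zone) and (square_distance((x,y),point) <= allowed_square_distance)) or
--                 ((not include_gray_zone) and (square_distance((x,y),point) < allowed_square_distance))):
--                 result.add((x,y))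
--
-- ## ENHANCEMENT: improve the allowed distances based on actual relative position
-- ##
-- ##            if (include_gray_zone and (get_max_square_distance_between_cell_points(point, (x,y)) <= (2 * radius)**2) or \
-- ##                not include_gray_zone and (get_min_square_distance_between_cell_points(point, (x,y)) < (2 * radius)**2)):
-- ##                result.add((x,y))
--
--     return result
-- ===== SOURCE B (Python) =====
-- HALF_OF_GRAY_AREA_THICKNESS = 10000
--
-- GRID_SPACEMENT = 7071
--
-- def _isqrt(n):
--     # integer square root of n >= 0 by binary search: lo*lo <= n < hi*hi
--     lo, hi = 0, n + 1
--     while hi - lo > 1: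
--         mid = (lo + hi) // 2
--         if mid * mid <= n:
--             lo = mid
--         else:
--             hi = mid
--     return lo
--
-- def get_neighborhood_points(label, point, radius, include_gray_zone):
--     result = set()
--
--     if include_gray_zone:
--         allowed_distance = radius + HALF_OF_GRAY_AREA_THICKNESS
--     else:
--         allowed_distance = radius - HALF_OF_GRAY_AREA_THICKNESS
--
--     allowed_square_distance = allowed_distance ** 2
--
--     trim = allowed_distance % GRID_SPACEMENT
--     left = point[0] - allowed_distance + trim
--     right = point[0] + allowed_distance - trim
--     bottom = point[1] - allowed_distance + trim
--     top = point[1] + allowed_distance - trim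
--
--     # per column, compute the exact inclusive y-band on the circle instead of
--     # testing every grid y
--     for x in range(left, right + 1, GRID_SPACEMENT):
--         rem = allowed_square_distance - (x - point[0]) ** 2
--         if include_gray_zone:
--             if rem < 0:
--                 continue
--             d = _isqrt(rem)
--         else:
--             if rem <= 0:
--                 continue
--             d = _isqrt(rem - 1)
--         lo = max(point[1] - d, bottom)
--         hi = min(point[1] + d, top)
--         start = bottom + ((lo - bottom + GRID_SPACEMENT - 1) // GRID_SPACEMENT) * GRID_SPACEMENT
--         for y in range(start, hi + 1, GRID_SPACEMENT):
--             result.add((x, y))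
--     return result
-- ===== Notes on version B (the rewrite author's own statement) =====
-- stated objective: alternative
-- what changed: Replaces the test-every-grid-y inner scan of the bounding square by a per-column computation: an integer square root gives the exact inclusive y-band of the circle for each grid x, and only the grid y values inside that band are emitted.
import Mathlib
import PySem

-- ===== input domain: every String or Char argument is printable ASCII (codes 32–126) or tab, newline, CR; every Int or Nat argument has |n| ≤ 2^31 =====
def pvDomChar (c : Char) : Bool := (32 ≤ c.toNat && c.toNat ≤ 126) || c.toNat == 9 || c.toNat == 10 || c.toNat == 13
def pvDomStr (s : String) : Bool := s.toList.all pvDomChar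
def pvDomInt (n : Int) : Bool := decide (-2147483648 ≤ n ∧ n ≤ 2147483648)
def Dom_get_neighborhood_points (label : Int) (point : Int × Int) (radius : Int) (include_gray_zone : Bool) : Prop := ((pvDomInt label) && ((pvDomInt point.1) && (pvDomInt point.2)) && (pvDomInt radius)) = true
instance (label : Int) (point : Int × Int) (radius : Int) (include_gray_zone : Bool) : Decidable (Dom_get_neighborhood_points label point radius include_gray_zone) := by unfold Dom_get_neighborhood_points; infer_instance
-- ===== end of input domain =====

-- B computes, for each grid column, the exact inclusive y-band on the circle via an
-- integer square root instead of testing every grid y in the bounding square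
-- (alternative decomposition; return-value equivalence, A returns a set so only
-- the set of points is observable).


-- ===== PORT A =====
def square_distance (a : Int × Int) (b : Int × Int) : Int :=
  (a.1 - b.1) ^ 2 + (a.2 - b.2) ^ 2

def get_neighborhood_points (label : Int) (point : Int × Int) (radius : Int) (include_gray_zone : Bool) : List (Int × Int) :=
  let result : PySem.Set (Int × Int) := PySem.Set.empty
  let allowed_distance : Int :=
    if include_gray_zone then radius + 10000 else radius - 10000
  let allowed_square_distance := allowed_distance ^ 2
  let trim := PySem.Int.mod allowed_distance 7071
  let left := point.1 - allowed_distance + trim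
  let right := point.1 + allowed_distance - trim
  let bottom := point.2 - allowed_distance + trim
  let top := point.2 + allowed_distance - trim
  (PySem.List.pyRange left (right + 1) 7071).foldl (fun result x =>
    (PySem.List.pyRange bottom (top + 1) 7071).foldl (fun result y =>
      if (include_gray_zone && decide (square_distance (x, y) point ≤ allowed_square_distance)) ||
         (!include_gray_zone && decide (square_distance (x, y) point < allowed_square_distance)) then
        PySem.Set.add result (x, y)
      else result) result) result

-- ===== PORT B =====
-- Source B's _isqrt: binary search keeping lo*lo ≤ n < hi*hi
def pvIsqrtLoop (n lo hi : Int) : Int :=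
  if hi - lo > 1 then
    let mid := PySem.Int.floordiv (lo + hi) 2
    if mid * mid ≤ n then pvIsqrtLoop n mid hi else pvIsqrtLoop n lo mid
  else lo
termination_by (hi - lo).toNat
decreasing_by
  · simp only [PySem.Int.floordiv_eq_ediv_of_pos (by norm_num : (0:Int) < 2)] at *
    omega
  · simp only [PySem.Int.floordiv_eq_ediv_of_pos (by norm_num : (0:Int) < 2)] at *
    omega

def pvIsqrt (n : Int) : Int := pvIsqrtLoop n 0 (n + 1)

-- the inner 'for y in range(start, hi+1, g): result.add((x, y))' of Source B
def pvColumn (result : PySem.Set (Int × Int)) (x py bottom top d : Int) : PySem.Set (Int × Int) :=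
  let lo := max (py - d) bottom
  let hi := min (py + d) top
  let start := bottom + (PySem.Int.floordiv (lo - bottom + 7071 - 1) 7071) * 7071
  (PySem.List.pyRange start (hi + 1) 7071).foldl (fun result y => PySem.Set.add result (x, y)) result

def get_neighborhood_points_alt (label : Int) (point : Int × Int) (radius : Int) (include_gray_zone : Bool) : List (Int × Int) :=
  let result : PySem.Set (Int × Int) := PySem.Set.empty
  let allowed_distance : Int :=
    if include_gray_zone then radius + 10000 else radius - 10000
  let allowed_square_distance := allowed_distance ^ 2
  let trim := PySem.Int.mod allowed_distance 7071
  let left := point.1 - allowed_distance + trim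
  let right := point.1 + allowed_distance - trim
  let bottom := point.2 - allowed_distance + trim
  let top := point.2 + allowed_distance - trim
  (PySem.List.pyRange left (right + 1) 7071).foldl (fun result x =>
    let rem := allowed_square_distance - (x - point.1) ^ 2
    if include_gray_zone then
      if rem < 0 then result
      else pvColumn result x point.2 bottom top (pvIsqrt rem)
    else
      if rem ≤ 0 then result
      else pvColumn result x point.2 bottom top (pvIsqrt (rem - 1))) result

-- ===== PRECONDITION & SPEC =====
def Spec_get_neighborhood_points (label : Int) (point : Int × Int) (radius : Int) (include_gray_zone : Bool) (out : List (Int × Int)) : Prop := out = get_neighborhood_points_alt label point radius include_gray_zone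
instance (label : Int) (point : Int × Int) (radius : Int) (include_gray_zone : Bool) (out : List (Int × Int)) : Decidable (Spec_get_neighborhood_points label point radius include_gray_zone out) := by unfold Spec_get_neighborhood_points; infer_instance

-- ===== CLAIM (what is proved, stated in full; the proofs are below) =====
def Claim_equal_get_neighborhood_points : Prop := ∀ (label : Int) (point : Int × Int) (radius : Int) (include_gray_zone : Bool), Dom_get_neighborhood_points label point radius include_gray_zone → Spec_get_neighborhood_points label point radius include_gray_zone (get_neighborhood_points label point radius include_gray_zone)

-- ===== LEMMAS AND PROOFS =====

-- invariant of Source B's binary-search square root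
theorem pvIsqrtLoop_spec (n lo hi : Int) (h0 : 0 ≤ lo) (hlo : lo * lo ≤ n)
    (hhi : n < hi * hi) (hlt : lo < hi) :
    0 ≤ pvIsqrtLoop n lo hi ∧ pvIsqrtLoop n lo hi * pvIsqrtLoop n lo hi ≤ n ∧
      n < (pvIsqrtLoop n lo hi + 1) * (pvIsqrtLoop n lo hi + 1) := by
  rw [pvIsqrtLoop]
  split
  · rename_i hgt
    have hmid : PySem.Int.floordiv (lo + hi) 2 = (lo + hi) / 2 :=
      PySem.Int.floordiv_eq_ediv_of_pos (by norm_num)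
    have hb : lo < (lo + hi) / 2 ∧ (lo + hi) / 2 < hi := by omega
    simp only [hmid]
    split
    · exact pvIsqrtLoop_spec n _ hi (by omega) (by assumption) hhi hb.2
    · exact pvIsqrtLoop_spec n lo _ h0 hlo (by omega) hb.1
  · rename_i hle
    have : hi = lo + 1 := by omega
    subst this
    exact ⟨h0, hlo, hhi⟩
termination_by (hi - lo).toNat
decreasing_by
  · simp only [PySem.Int.floordiv_eq_ediv_of_pos (by norm_num : (0:Int) < 2)] at *
    omega
  · simp only [PySem.Int.floordiv_eq_ediv_of_pos (by norm_num : (0:Int) < 2)] at *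
    omega

theorem pvIsqrt_spec (n : Int) (hn : 0 ≤ n) :
    0 ≤ pvIsqrt n ∧ pvIsqrt n * pvIsqrt n ≤ n ∧ n < (pvIsqrt n + 1) * (pvIsqrt n + 1) := by
  have : n < (n + 1) * (n + 1) := by nlinarith
  exact pvIsqrtLoop_spec n 0 (n + 1) le_rfl (by simpa using hn) this (by omega)

theorem sq_le_iff_abs_le (z d rem : Int) (hd : 0 ≤ d) (h1 : d * d ≤ rem)
    (h2 : rem < (d + 1) * (d + 1)) : z ^ 2 ≤ rem ↔ (-d ≤ z ∧ z ≤ d) := by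
  constructor
  · intro h
    constructor
    · by_contra hc
      rw [not_le] at hc
      nlinarith
    · by_contra hc
      rw [not_le] at hc
      nlinarith
  · intro ⟨ha, hb⟩
    nlinarith

-- a guarded accumulation is the accumulation over the filtered list
theorem foldl_ite_filter {α β : Type} (p : α → Bool) (f : β → α → β) (l : List α) (acc : β) :
    l.foldl (fun r x => if p x then f r x else r) acc = (l.filter p).foldl f acc := by
  induction l generalizing acc with
  | nil => rfl
  | cons a l ih =>
    by_cases h : p a <;> simp [h, ih]

theorem eq_of_mem_iff_pairwise_lt (l₁ l₂ : List Int) (h1 : l₁.Pairwise (· < ·))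
    (h2 : l₂.Pairwise (· < ·)) (h : ∀ y, y ∈ l₁ ↔ y ∈ l₂) : l₁ = l₂ := by
  induction l₁ generalizing l₂ with
  | nil =>
    cases l₂ with
    | nil => rfl
    | cons b l₂ => exact absurd ((h b).mpr (List.mem_cons_self)) (List.not_mem_nil)
  | cons a l₁ ih =>
    cases l₂ with
    | nil => exact absurd ((h a).mp (List.mem_cons_self)) (List.not_mem_nil)
    | cons b l₂ =>
      simp only [List.pairwise_cons] at h1 h2
      have hab : a = b := by
        rcases List.mem_cons.mp ((h a).mp (List.mem_cons_self)) with h' | h'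
        · exact h'
        · rcases List.mem_cons.mp ((h b).mpr (List.mem_cons_self)) with h'' | h''
          · exact h''.symm
          · exact absurd (lt_trans (h1.1 b h'') (h2.1 a h')) (lt_irrefl a)
      subst hab
      have htails : ∀ y, y ∈ l₁ ↔ y ∈ l₂ := by
        intro y
        constructor
        · intro hy
          rcases List.mem_cons.mp ((h y).mp (List.mem_cons_of_mem a hy)) with h' | h'
          · exact absurd (h' ▸ h1.1 y hy) (lt_irrefl y)
          · exact h'
        · intro hy
          rcases List.mem_cons.mp ((h y).mpr (List.mem_cons_of_mem a hy)) with h' | h'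
          · exact absurd (h' ▸ h2.1 y hy) (lt_irrefl y)
          · exact h'
      rw [ih l₂ h1.2 h2.2 htails]

theorem pairwise_lt_pyRange_g (b e : Int) :
    (PySem.List.pyRange b e 7071).Pairwise (· < ·) := by
  rw [PySem.List.pyRange_of_pos b e (by norm_num : (0:Int) < 7071)]
  refine List.Pairwise.map _ ?_ List.pairwise_lt_range
  intro k l hkl
  omega

-- filtering a positive-step python range to a band [lo, hi] is the range over the band
theorem filter_pyRange_band (b t lo hi : Int) (hb : b ≤ lo) (ht : hi ≤ t) :
    (PySem.List.pyRange b (t + 1) 7071).filter (fun y => decide (lo ≤ y) && decide (y ≤ hi)) =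
      PySem.List.pyRange (b + (PySem.Int.floordiv (lo - b + 7071 - 1) 7071) * 7071) (hi + 1) 7071 := by
  have hq : PySem.Int.floordiv (lo - b + 7071 - 1) 7071 = (lo - b + 7071 - 1) / 7071 :=
    PySem.Int.floordiv_eq_ediv_of_pos (by norm_num)
  rw [hq]
  apply eq_of_mem_iff_pairwise_lt
  · exact List.Pairwise.filter _ (pairwise_lt_pyRange_g _ _)
  · exact pairwise_lt_pyRange_g _ _
  · intro y
    rw [List.mem_filter]
    rw [PySem.List.mem_pyRange_iff_of_pos (by norm_num : (0:Int) < 7071)]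
    rw [PySem.List.mem_pyRange_iff_of_pos (by norm_num : (0:Int) < 7071)]
    simp only [Bool.and_eq_true, decide_eq_true_eq]
    omega

-- one column of the gray-zone (≤) scan equals Source B's computed band
theorem column_le (x px py bottom top asd : Int) (acc : PySem.Set (Int × Int)) :
    (PySem.List.pyRange bottom (top + 1) 7071).foldl (fun r y =>
        if decide ((x - px) ^ 2 + (y - py) ^ 2 ≤ asd) then PySem.Set.add r (x, y) else r) acc =
      if asd - (x - px) ^ 2 < 0 then acc
      else pvColumn acc x py bottom top (pvIsqrt (asd - (x - px) ^ 2)) := by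
  rw [foldl_ite_filter]
  split
  · rename_i hneg
    have : ∀ y ∈ PySem.List.pyRange bottom (top + 1) 7071,
        ¬ (decide ((x - px) ^ 2 + (y - py) ^ 2 ≤ asd) = true) := by
      intro y _ hc
      simp only [decide_eq_true_eq] at hc
      nlinarith [sq_nonneg (y - py)]
    rw [List.filter_eq_nil_iff.mpr this]
    rfl
  · rename_i hpos
    have hrem : 0 ≤ asd - (x - px) ^ 2 := by omega
    obtain ⟨hd0, hd1, hd2⟩ := pvIsqrt_spec _ hrem
    set d := pvIsqrt (asd - (x - px) ^ 2) with hdset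
    simp only [pvColumn]
    congr 1
    rw [← filter_pyRange_band bottom top (max (py - d) bottom) (min (py + d) top)
          (le_max_right _ _) (min_le_right _ _)]
    apply List.filter_congr
    intro y hy
    rw [PySem.List.mem_pyRange_iff_of_pos (by norm_num : (0:Int) < 7071)] at hy
    have hiff := sq_le_iff_abs_le (y - py) d (asd - (x - px) ^ 2) hd0 hd1 hd2
    rw [← Bool.decide_and, decide_eq_decide]
    constructor
    · intro h
      have := hiff.mp (by omega)
      omega
    · intro h
      have : (y - py) ^ 2 ≤ asd - (x - px) ^ 2 := hiff.mpr (by omega)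
      omega

-- one column of the strict (<) scan equals Source B's computed band
theorem column_lt (x px py bottom top asd : Int) (acc : PySem.Set (Int × Int)) :
    (PySem.List.pyRange bottom (top + 1) 7071).foldl (fun r y =>
        if decide ((x - px) ^ 2 + (y - py) ^ 2 < asd) then PySem.Set.add r (x, y) else r) acc =
      if asd - (x - px) ^ 2 ≤ 0 then acc
      else pvColumn acc x py bottom top (pvIsqrt (asd - (x - px) ^ 2 - 1)) := by
  rw [foldl_ite_filter]
  split
  · rename_i hneg
    have : ∀ y ∈ PySem.List.pyRange bottom (top + 1) 7071,
        ¬ (decide ((x - px) ^ 2 + (y - py) ^ 2 < asd) = true) := by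
      intro y _ hc
      simp only [decide_eq_true_eq] at hc
      nlinarith [sq_nonneg (y - py)]
    rw [List.filter_eq_nil_iff.mpr this]
    rfl
  · rename_i hpos
    have hrem : 0 ≤ asd - (x - px) ^ 2 - 1 := by omega
    obtain ⟨hd0, hd1, hd2⟩ := pvIsqrt_spec _ hrem
    set d := pvIsqrt (asd - (x - px) ^ 2 - 1) with hdset
    simp only [pvColumn]
    congr 1
    rw [← filter_pyRange_band bottom top (max (py - d) bottom) (min (py + d) top)
          (le_max_right _ _) (min_le_right _ _)]
    apply List.filter_congr
    intro y hy
    rw [PySem.List.mem_pyRange_iff_of_pos (by norm_num : (0:Int) < 7071)] at hy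
    have hiff := sq_le_iff_abs_le (y - py) d (asd - (x - px) ^ 2 - 1) hd0 hd1 hd2
    rw [← Bool.decide_and, decide_eq_decide]
    constructor
    · intro h
      have := hiff.mp (by omega)
      omega
    · intro h
      have : (y - py) ^ 2 ≤ asd - (x - px) ^ 2 - 1 := hiff.mpr (by omega)
      omega

-- ===== VERDICT (by name: the statement is the Claim_ definition above) =====
theorem get_neighborhood_points_spec : Claim_equal_get_neighborhood_points := by
  intro label point radius include_gray_zone _
  unfold Spec_get_neighborhood_points
  unfold get_neighborhood_points get_neighborhood_points_alt square_distance
  cases include_gray_zone with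
  | false =>
    simp only [Bool.false_and, Bool.not_false, Bool.true_and, Bool.false_or, Bool.false_eq_true,
      reduceIte]
    apply PySem.List.foldl_congr_mem
    intro acc x _
    simpa using column_lt x point.1 point.2 _ _ _ acc
  | true =>
    simp only [Bool.true_and, Bool.not_true, Bool.false_and, Bool.or_false,
      reduceIte]
    apply PySem.List.foldl_congr_mem
    intro acc x _
    simpa using column_le x point.1 point.2 _ _ _ acc
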